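-- pv_equiv track=rewrite | github.com/valetedd/code_iguess | lab.py | all_before_lab
-- ===== SOURCE A (Python) =====
-- def all_before_lab(list_lessons):
--     lessons_before_lab = list()
--     for i in list_lessons:
--         if "Laboratory" in i:
--             break
--         else:
--             lessons_before_lab.append(i)
--
--     return lessons_before_lab
-- ===== SOURCE B (Python) =====
-- def all_before_lab(list_lessons):
--     idx = next((i for i, x in enumerate(list_lessons) if "Laboratory" in x),
--                len(list_lessons))
--     return list_lessons[:idx]
-- ===== Notes on version B (the rewrite author's own statement) =====
-- stated objective: simpler
-- what changed: B computes only the integer index of the first 'Laboratory' entry (generator + next with default len) and returns the prefix by slicing, instead of accumulating a result list element by element with break.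
import Mathlib
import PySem

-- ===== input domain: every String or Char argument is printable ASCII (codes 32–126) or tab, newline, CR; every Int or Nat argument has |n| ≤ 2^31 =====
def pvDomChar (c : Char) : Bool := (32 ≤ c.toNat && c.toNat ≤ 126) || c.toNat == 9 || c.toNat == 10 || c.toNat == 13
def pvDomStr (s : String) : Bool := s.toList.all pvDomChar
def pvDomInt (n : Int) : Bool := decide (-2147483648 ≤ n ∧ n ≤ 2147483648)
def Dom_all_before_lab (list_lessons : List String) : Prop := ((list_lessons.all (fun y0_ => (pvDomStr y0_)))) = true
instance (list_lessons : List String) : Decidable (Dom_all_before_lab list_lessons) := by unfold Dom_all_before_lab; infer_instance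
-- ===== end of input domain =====

-- B replaces A's accumulate-and-break loop by computing the cutoff index of the first "Laboratory" entry and slicing the prefix (objective: simpler).
-- ===== PORT A =====
-- A: loop with append, break at the first element containing "Laboratory"
def all_before_lab (list_lessons : List String) : List String :=
  match list_lessons with
  | [] => []
  | i :: rest =>
    if PySem.Str.isIn "Laboratory" i then []
    else i :: all_before_lab rest

-- ===== PORT B =====
-- B: index of first match (default = length), then prefix by slicing
def labIdx (list_lessons : List String) : Nat :=
  match list_lessons.findIdx? (fun x => PySem.Str.isIn "Laboratory" x) with
  | some i => i
  | none => list_lessons.length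

def all_before_lab_alt (list_lessons : List String) : List String :=
  list_lessons.take (labIdx list_lessons)

-- ===== PRECONDITION & SPEC =====
def Spec_all_before_lab (list_lessons : List String) (out : List String) : Prop := out = all_before_lab_alt list_lessons
instance (list_lessons : List String) (out : List String) : Decidable (Spec_all_before_lab list_lessons out) := by unfold Spec_all_before_lab; infer_instance

-- ===== CLAIM (what is proved, stated in full; the proofs are below) =====
def Claim_equal_all_before_lab : Prop := ∀ (list_lessons : List String), Dom_all_before_lab list_lessons → Spec_all_before_lab list_lessons (all_before_lab list_lessons)

-- ===== LEMMAS AND PROOFS =====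

-- ===== VERDICT (by name: the statement is the Claim_ definition above) =====
theorem all_before_lab_eq (l : List String) : all_before_lab l = all_before_lab_alt l := by
  induction l with
  | nil => rfl
  | cons i rest ih =>
    by_cases h : PySem.Chars.isIn ['L','a','b','o','r','a','t','o','r','y'] i.toList = true
    · simp [all_before_lab, all_before_lab_alt, labIdx, List.findIdx?_cons, h]
    · cases hf : rest.findIdx? (fun x => PySem.Chars.isIn ['L','a','b','o','r','a','t','o','r','y'] x.toList) with
      | none =>
        simp [all_before_lab, all_before_lab_alt, labIdx, List.findIdx?_cons, h, hf] at ih ⊢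
        exact ih
      | some j =>
        simp [all_before_lab, all_before_lab_alt, labIdx, List.findIdx?_cons, h, hf] at ih ⊢
        exact ih

theorem all_before_lab_spec : Claim_equal_all_before_lab := by
  intro l _
  exact all_before_lab_eq l
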